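-- pv_equiv track=rewrite | github.com/mauricioPallares/extractor_amazon | extractor/formato.py | fixmarca
-- ===== SOURCE A (Python) =====
-- def fixmarca(marca: str) -> str:
--     """ Esta funcion normaliza la marca, eliminando caracteres especiales y capilizando el primer caracter de cada palabra
--
--     Args:
--         marca (str): nombre de la marca del producto
--
--     Returns:
--         str: marca del producto normalizada
--     """
--     marca = marca or "Genérica"
--
--     if marca is None or marca == "":
--         marca = "Genérica"
--     else:
--
--         aux = []
--
--         marca = marca.split("-")
--         for i in marca:
--             aux.append(i.title())
--             marca = "-".join(aux)
--         aux = []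
--
--     return marca
-- ===== SOURCE B (Python) =====
-- def fixmarca(marca: str) -> str:
--     """Single character-by-character pass with a 'previous char was a letter'
--     flag instead of A's split('-')/per-part title()/repeated join: a letter is
--     uppercased after a non-letter and lowercased after a letter, which is
--     exactly what titlecasing every '-'-separated part does."""
--     s = marca if marca else "Genérica"
--     out = []
--     prev = False
--     for c in s:
--         if c.isalpha():
--             out.append(c.lower() if prev else c.upper())
--             prev = True
--         else:
--             out.append(c)
--             prev = False
--     return "".join(out)
-- ===== Notes on version B (the rewrite author's own statement) =====
-- stated objective: simpler
-- what changed: Replaced A's split('-')/per-part title()/join-recomputed-each-iteration loop with a single character-by-character pass carrying a 'previous char was a letter' flag (uppercase a letter after a non-letter, lowercase otherwise), which is exactly title()'s word-boundary rule distributed over the '-'-split.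
import Mathlib
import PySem

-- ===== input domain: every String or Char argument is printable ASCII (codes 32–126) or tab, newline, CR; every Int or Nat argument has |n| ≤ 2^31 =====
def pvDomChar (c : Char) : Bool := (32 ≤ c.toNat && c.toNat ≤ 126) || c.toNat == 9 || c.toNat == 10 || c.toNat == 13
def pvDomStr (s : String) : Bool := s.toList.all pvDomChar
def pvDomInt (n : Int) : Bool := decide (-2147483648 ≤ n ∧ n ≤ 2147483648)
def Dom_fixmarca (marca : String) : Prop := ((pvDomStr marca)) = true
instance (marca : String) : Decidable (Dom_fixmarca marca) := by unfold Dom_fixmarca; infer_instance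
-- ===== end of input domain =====

-- B replaces A's split('-')/per-part title()/repeated-join loop by one character pass with a
-- previous-char-was-a-letter flag; objective: simpler.

-- ===== PORT A =====
-- Python str.title() for A. A char is "cased" iff it is an ASCII letter or 'é'
-- (the only non-ASCII char reachable on Dom, from the literal "Genérica", where it occurs
-- mid-word only, so Char.toLower/toUpper fixing 'é' is exact here).
def pyIsCased (c : Char) : Bool := c.isAlpha || c == 'é'

def pyTitleGo : Bool → List Char → List Char
  | _, [] => []
  | prev, c :: cs =>
      (if pyIsCased c then (if prev then c.toLower else c.toUpper) else c) :: pyTitleGo (pyIsCased c) cs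

def pyTitle (l : List Char) : List Char := pyTitleGo false l

def fixmarca (marca : String) : String :=
  -- marca = marca or "Genérica"
  let m := if marca = "" then "Genérica" else marca
  -- if marca is None or marca == "": (the None test is unreachable for a str argument)
  if m = "" then "Genérica"
  else
    -- marca = marca.split("-"); for i in marca: aux.append(i.title()); marca = "-".join(aux)
    let parts := PySem.Chars.splitOn m.toList ['-']
    let st := parts.foldl
      (fun (st : List (List Char) × List Char) i =>
        let aux := st.1 ++ [pyTitle i]
        (aux, PySem.Chars.join ['-'] aux))
      ([], [])   -- parts is never empty, so st.2 is always overwritten by the loop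
    String.ofList st.2

-- ===== PORT B =====
-- Python c.isalpha() for the chars reachable here: ASCII letters, plus 'é' from the fallback
-- literal (exact on Dom ∪ {'é'}).
def bIsAlpha (c : Char) : Bool := c.isAlpha || c == 'é'

def fixmarca_alt (marca : String) : String :=
  let s := if marca = "" then "Genérica" else marca
  -- out = []; prev = False; for c in s: …
  let st := s.toList.foldl
    (fun (st : List Char × Bool) c =>
      if bIsAlpha c then (st.1 ++ [if st.2 then c.toLower else c.toUpper], true)
      else (st.1 ++ [c], false))
    ([], false)
  String.ofList st.1

-- ===== PRECONDITION & SPEC =====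
def Spec_fixmarca (marca : String) (out : String) : Prop := out = fixmarca_alt marca
instance (marca : String) (out : String) : Decidable (Spec_fixmarca marca out) := by unfold Spec_fixmarca; infer_instance

-- ===== CLAIM (what is proved, stated in full; the proofs are below) =====
def Claim_equal_fixmarca : Prop := ∀ (marca : String), Dom_fixmarca marca → Spec_fixmarca marca (fixmarca marca)

-- ===== LEMMAS AND PROOFS =====

-- reference split on '-' (what PySem.Chars.splitOn computes for this separator)
def mySplit : List Char → List (List Char)
  | [] => [[]]
  | c :: rest => if c = '-' then [] :: mySplit rest else (mySplit rest).modifyHead (c :: ·)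

theorem mySplit_cons_ex (l : List Char) : ∃ p ps, mySplit l = p :: ps := by
  induction l with
  | nil => exact ⟨[], [], rfl⟩
  | cons c rest ih =>
    obtain ⟨p, ps, hp⟩ := ih
    by_cases hc : c = '-'
    · exact ⟨[], mySplit rest, by simp [mySplit, hc]⟩
    · exact ⟨c :: p, ps, by simp [mySplit, hc, hp]⟩

theorem go_spec (fuel : Nat) (l cur : List Char) (acc : List (List Char))
    (h : l.length < fuel) :
    PySem.Chars.splitOn.go ['-'] fuel l cur acc
      = acc.reverse ++ (mySplit l).modifyHead (cur.reverse ++ ·) := by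
  induction fuel generalizing l cur acc with
  | zero => omega
  | succ fuel ih =>
    cases l with
    | nil => simp [PySem.Chars.splitOn.go, mySplit]
    | cons c rest =>
      by_cases hc : c = '-'
      · subst hc
        have hpre : List.isPrefixOf ['-'] ('-' :: rest) = true := by simp [List.isPrefixOf]
        rw [PySem.Chars.splitOn.go]
        rw [if_pos hpre]
        have hd : List.drop (['-'] : List Char).length ('-' :: rest) = rest := rfl
        rw [hd, ih rest [] (cur.reverse :: acc) (by simpa using Nat.lt_of_succ_lt_succ h)]
        have hms : mySplit ('-' :: rest) = [] :: mySplit rest := rfl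
        rw [hms]
        obtain ⟨p, ps, hp⟩ := mySplit_cons_ex rest
        rw [hp]
        simp [List.modifyHead]
      · have hpre : List.isPrefixOf ['-'] (c :: rest) = false := by
          simp [List.isPrefixOf]
          exact fun h => hc h.symm
        rw [PySem.Chars.splitOn.go]
        rw [if_neg (by simp [hpre])]
        rw [ih rest (c :: cur) acc (by simpa using Nat.lt_of_succ_lt_succ h)]
        have hms : mySplit (c :: rest) = (mySplit rest).modifyHead (c :: ·) := by
          rw [mySplit, if_neg hc]
        rw [hms]
        obtain ⟨p, ps, hp⟩ := mySplit_cons_ex rest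
        rw [hp]
        simp [List.modifyHead]

theorem splitOn_dash (cs : List Char) :
    PySem.Chars.splitOn cs ['-'] = mySplit cs := by
  unfold PySem.Chars.splitOn
  rw [go_spec (cs.length + 1) cs [] [] (by omega)]
  obtain ⟨p, ps, hp⟩ := mySplit_cons_ex cs
  simp [hp]

-- title the first piece with carry b, the rest from a word start
def titleParts (b : Bool) : List (List Char) → List (List Char)
  | [] => []
  | p :: ps => pyTitleGo b p :: ps.map pyTitle

theorem titleParts_false (l : List (List Char)) :
    titleParts false l = l.map pyTitle := by
  cases l <;> simp [titleParts, pyTitle]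

-- the heart of A's side: title() distributes over the '-'-split
theorem titleGo_join (cs : List Char) : ∀ b,
    pyTitleGo b cs = PySem.Chars.join ['-'] (titleParts b (mySplit cs)) := by
  induction cs with
  | nil => intro b; simp [mySplit, titleParts, pyTitleGo, PySem.Chars.join, List.intercalate]
  | cons c rest ih =>
    intro b
    by_cases hc : c = '-'
    · subst hc
      obtain ⟨p, ps, hp⟩ := mySplit_cons_ex rest
      have h2 := ih false
      rw [hp, titleParts_false] at h2
      simp [mySplit, titleParts, pyTitleGo, pyIsCased, hp,
        PySem.Chars.join, List.intercalate, h2, pyTitle]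
    · obtain ⟨p, ps, hp⟩ := mySplit_cons_ex rest
      have h2 := ih (pyIsCased c)
      rw [hp] at h2
      cases ps with
      | nil =>
        simp [mySplit, hc, hp, titleParts, pyTitleGo,
          PySem.Chars.join, List.intercalate] at h2 ⊢
        simp [h2]
      | cons q qs =>
        simp [mySplit, hc, hp, titleParts, pyTitleGo,
          PySem.Chars.join, List.intercalate] at h2 ⊢
        simp [h2]

-- A's loop: aux collects the titled pieces, marca is re-joined each iteration
theorem foldA (parts : List (List Char)) : ∀ (aux : List (List Char)) (s : List Char),
    parts.foldl
      (fun (st : List (List Char) × List Char) i =>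
        (st.1 ++ [pyTitle i], PySem.Chars.join ['-'] (st.1 ++ [pyTitle i]))) (aux, s)
      = (aux ++ parts.map pyTitle,
          if parts.isEmpty then s else PySem.Chars.join ['-'] (aux ++ parts.map pyTitle)) := by
  induction parts with
  | nil => intro aux s; simp
  | cons p ps ih =>
    intro aux s
    simp only [List.foldl_cons]
    rw [ih]
    cases ps <;> simp

theorem A_eq_title (cs : List Char) :
    PySem.Chars.join ['-'] ((PySem.Chars.splitOn cs ['-']).map pyTitle) = pyTitle cs := by
  rw [splitOn_dash, ← titleParts_false, pyTitle, titleGo_join]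

-- B's loop computes pyTitleGo with the flag as carry
theorem foldB (cs : List Char) : ∀ (acc : List Char) (b : Bool),
    (cs.foldl
      (fun (st : List Char × Bool) c =>
        if bIsAlpha c then (st.1 ++ [if st.2 then c.toLower else c.toUpper], true)
        else (st.1 ++ [c], false))
      (acc, b)).1 = acc ++ pyTitleGo b cs := by
  induction cs with
  | nil => intro acc b; simp [pyTitleGo]
  | cons c rest ih =>
    intro acc b
    by_cases hc : bIsAlpha c = true
    · have hcased : pyIsCased c = true := hc
      simp [List.foldl_cons, hc, ih, pyTitleGo, hcased]
    · have hcased : pyIsCased c = false := by simpa [bIsAlpha, pyIsCased] using hc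
      simp [List.foldl_cons, hc, ih, pyTitleGo, hcased]

-- ===== VERDICT (by name: the statement is the Claim_ definition above) =====
theorem fixmarca_spec : Claim_equal_fixmarca := by
  intro marca _
  unfold Spec_fixmarca fixmarca fixmarca_alt
  by_cases hm : marca = ""
  · subst hm; decide
  · simp only [hm, if_false]
    obtain ⟨p, ps, hp⟩ := mySplit_cons_ex marca.toList
    rw [foldA, foldB]
    have hparts : PySem.Chars.splitOn marca.toList ['-'] = p :: ps := by
      rw [splitOn_dash, hp]
    simp only [hparts, List.isEmpty_cons, Bool.false_eq_true, if_false, List.nil_append]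
    rw [← hparts, A_eq_title, pyTitle]
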